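-- pv_equiv track=rewrite | github.com/betovildoza/Architect_compass | compass/path_resolver.py | _maybe_append_ext
-- ===== SOURCE A (Python) =====
-- _KNOWN_PATH_EXTENSIONS = {
--     ".php", ".js", ".mjs", ".cjs", ".ts", ".tsx", ".jsx", ".css", ".scss",
--     ".html", ".htm", ".json", ".xml", ".svg", ".png", ".jpg", ".jpeg",
--     ".gif", ".webp", ".ico", ".woff", ".woff2", ".ttf", ".otf", ".eot",
--     ".mp4", ".webm", ".mp3", ".wav", ".pdf", ".md",
-- }
--
-- def _maybe_append_ext(path_str, ext_default):
--     """Agrega `ext_default` si `path_str` no termina en extensión conocida.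
--
--     Devuelve string. Si `ext_default` es falsy, devuelve path_str tal cual.
--     """
--     if not ext_default or not path_str:
--         return path_str
--     low = path_str.lower()
--     for ext in _KNOWN_PATH_EXTENSIONS:
--         if low.endswith(ext):
--             return path_str
--     # Strip query/fragment antes de añadir.
--     return path_str + ext_default
-- ===== SOURCE B (Python) =====
-- _KNOWN_PATH_EXTENSIONS = {
--     ".php", ".js", ".mjs", ".cjs", ".ts", ".tsx", ".jsx", ".css", ".scss",
--     ".html", ".htm", ".json", ".xml", ".svg", ".png", ".jpg", ".jpeg",
--     ".gif", ".webp", ".ico", ".woff", ".woff2", ".ttf", ".otf", ".eot",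
--     ".mp4", ".webm", ".mp3", ".wav", ".pdf", ".md",
-- }
--
-- def _maybe_append_ext(path_str, ext_default):
--     if not ext_default or not path_str:
--         return path_str
--     low = path_str.lower()
--     _before, sep, tail = low.rpartition('.')
--     if sep and '.' + tail in _KNOWN_PATH_EXTENSIONS:
--         return path_str
--     return path_str + ext_default
-- ===== Notes on version B (the rewrite author's own statement) =====
-- stated objective: idiomatic
-- what changed: Replaces the linear scan over all 30 known extensions with endswith by a single rpartition that extracts the trailing extension once, followed by one set-membership test.
import Mathlib
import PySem

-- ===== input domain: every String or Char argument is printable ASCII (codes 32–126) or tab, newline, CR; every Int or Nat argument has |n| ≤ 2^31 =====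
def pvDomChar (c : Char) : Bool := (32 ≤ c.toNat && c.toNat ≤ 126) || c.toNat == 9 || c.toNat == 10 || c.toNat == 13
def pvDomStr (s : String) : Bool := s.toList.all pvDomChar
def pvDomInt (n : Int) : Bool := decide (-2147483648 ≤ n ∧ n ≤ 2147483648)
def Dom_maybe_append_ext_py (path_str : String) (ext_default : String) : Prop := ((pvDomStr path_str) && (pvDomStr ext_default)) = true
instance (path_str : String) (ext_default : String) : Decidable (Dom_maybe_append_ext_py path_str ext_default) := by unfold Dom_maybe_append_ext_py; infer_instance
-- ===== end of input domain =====

-- B replaces A's linear endswith-scan over the 30 known extensions by one rpartition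
-- extracting the trailing extension followed by a single membership test (idiomatic, not faster).

-- ===== PORT A =====
-- the module-level set _KNOWN_PATH_EXTENSIONS (a Python set = list of distinct elements)
def knownPathExtensions : List String :=
  [".php", ".js", ".mjs", ".cjs", ".ts", ".tsx", ".jsx", ".css", ".scss",
   ".html", ".htm", ".json", ".xml", ".svg", ".png", ".jpg", ".jpeg",
   ".gif", ".webp", ".ico", ".woff", ".woff2", ".ttf", ".otf", ".eot",
   ".mp4", ".webm", ".mp3", ".wav", ".pdf", ".md"]

-- the 'for ext in _KNOWN_PATH_EXTENSIONS: if low.endswith(ext): return path_str' loop,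
-- falling through to 'return path_str + ext_default'
def extScanLoop (low : List Char) (path_str ext_default : String) : List String → String
  | [] => path_str ++ ext_default
  | e :: rest =>
    if PySem.Chars.endswith low e.toList then path_str
    else extScanLoop low path_str ext_default rest

def maybe_append_ext_py (path_str : String) (ext_default : String) : String :=
  if ext_default = "" ∨ path_str = "" then path_str
  else
    let low := PySem.Str.lower path_str
    extScanLoop low.toList path_str ext_default knownPathExtensions

-- ===== PORT B =====
-- tail of low.rpartition('.'): none if no '.', else the characters after the LAST '.'
def rpartDotTail : List Char → Option (List Char)
  | [] => none
  | c :: rest =>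
    match rpartDotTail rest with
    | some t => some t
    | none => if c = '.' then some rest else none

def maybe_append_ext_py_alt (path_str : String) (ext_default : String) : String :=
  if ext_default = "" ∨ path_str = "" then path_str
  else
    let low := PySem.Str.lower path_str
    match rpartDotTail low.toList with
    | some tail =>
      if (String.ofList ('.' :: tail)) ∈ knownPathExtensions then path_str
      else path_str ++ ext_default
    | none => path_str ++ ext_default

-- ===== PRECONDITION & SPEC =====
def Spec_maybe_append_ext_py (path_str : String) (ext_default : String) (out : String) : Prop := out = maybe_append_ext_py_alt path_str ext_default
instance (path_str : String) (ext_default : String) (out : String) : Decidable (Spec_maybe_append_ext_py path_str ext_default out) := by unfold Spec_maybe_append_ext_py; infer_instance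

-- ===== CLAIM (what is proved, stated in full; the proofs are below) =====
def Claim_equal_maybe_append_ext_py : Prop := ∀ (path_str : String) (ext_default : String), Dom_maybe_append_ext_py path_str ext_default → Spec_maybe_append_ext_py path_str ext_default (maybe_append_ext_py path_str ext_default)

-- ===== LEMMAS AND PROOFS =====

theorem extScanLoop_eq (low : List Char) (p e : String) (l : List String) :
    extScanLoop low p e l =
      if l.any (fun s => PySem.Chars.endswith low s.toList) then p else p ++ e := by
  induction l with
  | nil => simp [extScanLoop]
  | cons s rest ih =>
    simp only [extScanLoop, List.any_cons, ih]
    by_cases h : PySem.Chars.endswith low s.toList = true <;> simp [h]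

theorem rpartDotTail_eq_none_iff (cs : List Char) :
    rpartDotTail cs = none ↔ '.' ∉ cs := by
  induction cs with
  | nil => simp [rpartDotTail]
  | cons c rest ih =>
    simp only [rpartDotTail, List.mem_cons]
    cases h : rpartDotTail rest with
    | some t =>
      constructor
      · intro hc; simp at hc
      · intro hc
        have hnone := ih.mpr (fun hm => hc (Or.inr hm))
        simp [h] at hnone
    | none =>
      have hrest : '.' ∉ rest := ih.mp h
      by_cases hc : c = '.'
      · simp [hc]
      · simp [hc, hrest, Ne.symm hc]

theorem rpartDotTail_eq_some_iff (cs t : List Char) :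
    rpartDotTail cs = some t ↔ ∃ p, cs = p ++ '.' :: t ∧ '.' ∉ t := by
  induction cs generalizing t with
  | nil =>
    simp only [rpartDotTail]
    constructor
    · intro h; simp at h
    · rintro ⟨p, hp, -⟩; simp at hp
  | cons c rest ih =>
    simp only [rpartDotTail]
    cases h : rpartDotTail rest with
    | some t' =>
      obtain ⟨p', hp', hnt'⟩ := (ih t').mp h
      constructor
      · intro heq
        have : t = t' := by simpa using heq.symm
        subst this
        exact ⟨c :: p', by simp [hp'], hnt'⟩
      · rintro ⟨p, hp, hnt⟩
        cases p with
        | nil =>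
          simp at hp
          obtain ⟨hc, hrest⟩ := hp
          exact absurd (hrest ▸ (by simp [hp'] : '.' ∈ rest)) hnt
        | cons q qs =>
          simp at hp
          have : rpartDotTail rest = some t := (ih t).mpr ⟨qs, hp.2, hnt⟩
          rw [h] at this; simpa using this
    | none =>
      have hrest : '.' ∉ rest := (rpartDotTail_eq_none_iff rest).mp h
      by_cases hc : c = '.'
      · subst hc
        rw [if_pos rfl]
        constructor
        · intro heq
          have : t = rest := by simpa using heq.symm
          subst this
          exact ⟨[], by simp, hrest⟩
        · rintro ⟨p, hp, hnt⟩
          cases p with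
          | nil => simp at hp; simp [hp]
          | cons q qs =>
            simp at hp
            exact absurd (hp.2 ▸ (by simp : '.' ∈ qs ++ '.' :: t)) hrest
      · simp only [if_neg hc]
        constructor
        · intro h'; simp at h'
        · rintro ⟨p, hp, hnt⟩
          cases p with
          | nil => simp at hp; exact absurd hp.1 hc
          | cons q qs =>
            simp at hp
            exact absurd (hp.2 ▸ (by simp : '.' ∈ qs ++ '.' :: t)) hrest

-- every known extension is a dot followed by a dot-free suffix
theorem knownExts_shape : ∀ e ∈ knownPathExtensions, ∃ s, e.toList = '.' :: s ∧ '.' ∉ s := by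
  intro e he
  fin_cases he <;> exact ⟨_, rfl, by decide⟩

theorem any_endswith_iff (low : List Char) :
    (knownPathExtensions.any (fun s => PySem.Chars.endswith low s.toList) = true) ↔
      ∃ t, rpartDotTail low = some t ∧ (String.ofList ('.' :: t)) ∈ knownPathExtensions := by
  constructor
  · intro h
    obtain ⟨e, he, hend⟩ := List.any_eq_true.mp h
    obtain ⟨s, hs, hns⟩ := knownExts_shape e he
    have hsuf : e.toList <:+ low := (PySem.Chars.endswith_iff _ _).mp hend
    obtain ⟨p, hp⟩ := hsuf
    refine ⟨s, (rpartDotTail_eq_some_iff low s).mpr ⟨p, by rw [← hp, hs], hns⟩, ?_⟩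
    have hmk : String.ofList ('.' :: s) = e := by
      rw [← hs]; exact String.ofList_toList
    rwa [hmk]
  · rintro ⟨t, hsome, hmem⟩
    obtain ⟨p, hp, hnt⟩ := (rpartDotTail_eq_some_iff low t).mp hsome
    refine List.any_eq_true.mpr ⟨String.ofList ('.' :: t), hmem, ?_⟩
    refine (PySem.Chars.endswith_iff _ _).mpr ⟨p, ?_⟩
    simpa using hp.symm

-- ===== VERDICT (by name: the statement is the Claim_ definition above) =====
theorem maybe_append_ext_py_spec : Claim_equal_maybe_append_ext_py := by
  intro path_str ext_default _
  unfold Spec_maybe_append_ext_py maybe_append_ext_py maybe_append_ext_py_alt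
  by_cases hg : ext_default = "" ∨ path_str = ""
  · simp [hg]
  · simp only [if_neg hg]
    set low := (PySem.Str.lower path_str).toList with hlow
    rw [extScanLoop_eq]
    cases hrt : rpartDotTail low with
    | none =>
      have hb : knownPathExtensions.any (fun s => PySem.Chars.endswith low s.toList) = false := by
        refine Bool.eq_false_iff.mpr ?_
        intro htrue
        obtain ⟨t, ht, -⟩ := (any_endswith_iff low).mp htrue
        rw [hrt] at ht; simp at ht
      simp [hb]
    | some t =>
      by_cases hm : (String.ofList ('.' :: t)) ∈ knownPathExtensions
      · have hb : knownPathExtensions.any (fun s => PySem.Chars.endswith low s.toList) = true :=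
          (any_endswith_iff low).mpr ⟨t, hrt, hm⟩
        simp [hb, hm]
      · have hb : knownPathExtensions.any (fun s => PySem.Chars.endswith low s.toList) = false := by
          refine Bool.eq_false_iff.mpr ?_
          intro htrue
          obtain ⟨t', ht', hm'⟩ := (any_endswith_iff low).mp htrue
          rw [hrt] at ht'
          injection ht' with hteq
          subst hteq
          exact hm hm'
        simp [hb, hm]
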